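-- pv_equiv track=rewrite | github.com/avalentierra/Algorirmos_y_grafos | Clie/APP.py | Listas_Bipartes
-- ===== SOURCE A (Python) =====
-- def Listas_Bipartes(cadena):
--     lista1=[]
--     lista2=[]
--     c=0
--     for i in range(0,len(cadena)):
--         if cadena[i]!="(":
--             if cadena[i]!=",":
--
--                 if cadena[i]!=" ":
--                     if cadena[i]!="'":
--                       if cadena[i]!=")":
--                         lista1.append(cadena[i])
--                       else:
--                          c=c+1
--                          break
--         c=c+1
--     for i in range(c,len(cadena)):
--         if cadena[i]!="(":
--             if cadena[i]!=",":
--                 if cadena[i]!=" ":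
--                     if cadena[i]!="'":
--                       if cadena[i]!=")":
--                         lista2.append(cadena[i])
--                       else:
--                         break
--
--     return lista1,lista2
-- ===== SOURCE B (Python) =====
-- def Listas_Bipartes(cadena):
--     i1 = cadena.find(')')
--     if i1 == -1:
--         prefix, rest = cadena, ''
--     else:
--         prefix, rest = cadena[:i1], cadena[i1+1:]
--     i2 = rest.find(')')
--     second = rest if i2 == -1 else rest[:i2]
--     lista1 = [ch for ch in prefix if ch not in "(, '"]
--     lista2 = [ch for ch in second if ch not in "(, '"]
--     return lista1, lista2
-- ===== Notes on version B (the rewrite author's own statement) =====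
-- stated objective: simpler
-- what changed: Replaces A's manual per-character counter-and-break loops with a single find of the first closing parenthesis plus slicing to isolate the two segments, each then filtered by a comprehension.
import Mathlib
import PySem

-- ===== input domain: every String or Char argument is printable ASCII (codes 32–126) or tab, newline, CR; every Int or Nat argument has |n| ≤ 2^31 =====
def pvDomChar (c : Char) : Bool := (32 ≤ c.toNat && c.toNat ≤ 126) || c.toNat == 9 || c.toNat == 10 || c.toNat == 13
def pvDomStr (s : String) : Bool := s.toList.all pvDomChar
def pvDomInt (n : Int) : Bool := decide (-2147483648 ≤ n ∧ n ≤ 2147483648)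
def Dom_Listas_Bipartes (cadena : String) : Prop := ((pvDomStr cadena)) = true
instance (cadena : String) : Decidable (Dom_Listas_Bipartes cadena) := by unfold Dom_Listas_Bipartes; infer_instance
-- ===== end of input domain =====

-- B replaces A's manual counter-and-break loops by find()/slicing plus comprehensions (objective: simpler).

-- ===== PORT A =====
-- first loop: appends kept chars to lista1, counts every char in c, breaks (after one last c+1) at the first ')'
def pvLoopA1 : List Char → List String → Nat → (List String × Nat)
  | [], lista1, c => (lista1, c)
  | ch :: rest, lista1, c =>
    if ch ≠ '(' then
      if ch ≠ ',' then
        if ch ≠ ' ' then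
          if ch ≠ '\'' then
            if ch ≠ ')' then pvLoopA1 rest (lista1 ++ [String.mk [ch]]) (c + 1)
            else (lista1, c + 1)      -- c=c+1; break
          else pvLoopA1 rest lista1 (c + 1)
        else pvLoopA1 rest lista1 (c + 1)
      else pvLoopA1 rest lista1 (c + 1)
    else pvLoopA1 rest lista1 (c + 1)

-- second loop: same filtering into lista2, plain break at ')'
def pvLoopA2 : List Char → List String → List String
  | [], lista2 => lista2
  | ch :: rest, lista2 =>
    if ch ≠ '(' then
      if ch ≠ ',' then
        if ch ≠ ' ' then
          if ch ≠ '\'' then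
            if ch ≠ ')' then pvLoopA2 rest (lista2 ++ [String.mk [ch]])
            else lista2      -- break
          else pvLoopA2 rest lista2
        else pvLoopA2 rest lista2
      else pvLoopA2 rest lista2
    else pvLoopA2 rest lista2

def Listas_Bipartes (cadena : String) : List String × List String :=
  let cs := cadena.toList
  let (lista1, c) := pvLoopA1 cs [] 0
  let lista2 := pvLoopA2 (cs.drop c) []    -- range(c, len(cadena)) over cadena[i]
  (lista1, lista2)

-- ===== PORT B =====
-- [ch for ch in l if ch not in "(, '"]
def pvKeep (l : List Char) : List String :=
  (l.filter (fun ch => !(['(', ',', ' ', '\''].contains ch))).map (fun ch => String.mk [ch])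

def Listas_Bipartes_alt (cadena : String) : List String × List String :=
  let cs := cadena.toList
  let i1 := PySem.Chars.find cs [')']
  let pr := if i1 = -1 then (cs, ([] : List Char))
            else (PySem.List.slice cs none (some i1), PySem.List.slice cs (some (i1 + 1)) none)
  let i2 := PySem.Chars.find pr.2 [')']
  let second := if i2 = -1 then pr.2 else PySem.List.slice pr.2 none (some i2)
  (pvKeep pr.1, pvKeep second)

-- ===== PRECONDITION & SPEC =====
def Spec_Listas_Bipartes (cadena : String) (out : List String × List String) : Prop := out = Listas_Bipartes_alt cadena
instance (cadena : String) (out : List String × List String) : Decidable (Spec_Listas_Bipartes cadena out) := by unfold Spec_Listas_Bipartes; infer_instance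

-- ===== CLAIM (what is proved, stated in full; the proofs are below) =====
def Claim_equal_Listas_Bipartes : Prop := ∀ (cadena : String), Dom_Listas_Bipartes cadena → Spec_Listas_Bipartes cadena (Listas_Bipartes cadena)

-- ===== LEMMAS AND PROOFS =====

-- index of the first ')' (= length if none)
def pvT (l : List Char) : Nat := l.findIdx (· == ')')

theorem pvLoopA1_spec (cs : List Char) : ∀ (l1 : List String) (c : Nat),
    pvLoopA1 cs l1 c = (l1 ++ pvKeep (cs.take (pvT cs)),
      c + (if ')' ∈ cs then pvT cs + 1 else cs.length)) := by
  induction cs with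
  | nil => intro l1 c; simp [pvLoopA1, pvKeep]
  | cons ch rest ih =>
    intro l1 c
    by_cases hp : ch = ')'
    · subst hp
      simp [pvLoopA1, pvT, List.findIdx_cons, pvKeep]
    · have hb : (ch == ')') = false := beq_eq_false_iff_ne.mpr hp
      have ht : pvT (ch :: rest) = pvT rest + 1 := by
        simp [pvT, List.findIdx_cons, hb]
      have hp' : ')' ≠ ch := Ne.symm hp
      have hmem : (')' ∈ ch :: rest) ↔ (')' ∈ rest) := by
        simp [List.mem_cons, hp']
      rw [pvLoopA1]
      by_cases h1 : ch = '('
      · subst h1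
        simp only [ht, hmem, List.take_succ_cons, ih]
        simp [pvKeep]
        split <;> omega
      by_cases h2 : ch = ','
      · subst h2
        simp only [ht, hmem, List.take_succ_cons, ih]
        simp [pvKeep, h1]
        split <;> omega
      by_cases h3 : ch = ' '
      · subst h3
        simp only [ht, hmem, List.take_succ_cons, ih]
        simp [pvKeep, h1, h2]
        split <;> omega
      by_cases h4 : ch = '\''
      · subst h4
        simp only [ht, hmem, List.take_succ_cons, ih]
        simp [pvKeep, h1, h2, h3]
        split <;> omega
      · simp only [ht, hmem, List.take_succ_cons, ih]
        simp [pvKeep, h1, h2, h3, h4, hp]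
        split <;> omega

theorem pvLoopA2_spec (cs : List Char) : ∀ (l2 : List String),
    pvLoopA2 cs l2 = l2 ++ pvKeep (cs.take (pvT cs)) := by
  induction cs with
  | nil => intro l2; simp [pvLoopA2, pvKeep]
  | cons ch rest ih =>
    intro l2
    by_cases hp : ch = ')'
    · subst hp; simp [pvLoopA2, pvT, List.findIdx_cons, pvKeep]
    · have hb : (ch == ')') = false := beq_eq_false_iff_ne.mpr hp
      have ht : pvT (ch :: rest) = pvT rest + 1 := by
        simp [pvT, List.findIdx_cons, hb]
      rw [pvLoopA2]
      simp only [ht, List.take_succ_cons]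
      by_cases h1 : ch = '(' <;> by_cases h2 : ch = ',' <;> by_cases h3 : ch = ' ' <;>
        by_cases h4 : ch = '\'' <;>
        simp_all [pvKeep]

theorem pv_singleton_prefix (a : Char) (l : List Char) : [a] <+: l ↔ l.head? = some a := by
  cases l with
  | nil => simp
  | cons b m => simp [List.cons_prefix_cons, eq_comm]

theorem pv_find_singleton (cs : List Char) (a : Char) :
    PySem.Chars.find cs [a] = if a ∈ cs then ((cs.findIdx (· == a) : Nat) : Int) else -1 := by
  by_cases hm : a ∈ cs
  · have hinf : [a] <:+: cs := by
      obtain ⟨s, t, rfl⟩ := List.append_of_mem hm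
      exact ⟨s, t, by simp⟩
    have h0 : 0 ≤ PySem.Chars.find cs [a] := (PySem.Chars.find_nonneg_iff cs [a]).mpr hinf
    obtain ⟨hpre, hmin⟩ := PySem.Chars.find_spec h0
    set n := (PySem.Chars.find cs [a]).toNat with hn
    have hget : cs[n]? = some a := by
      rw [← List.head?_drop]
      exact (pv_singleton_prefix a _).mp hpre
    have hnlen : n < cs.length := by
      by_contra h
      rw [List.getElem?_eq_none (Nat.le_of_not_lt h)] at hget
      simp at hget
    have hfl : cs.findIdx (· == a) < cs.length :=
      List.findIdx_lt_length.mpr ⟨a, hm, by simp⟩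
    have heq : cs.findIdx (· == a) = n := by
      rcases Nat.lt_trichotomy (cs.findIdx (· == a)) n with h | h | h
      · exfalso
        apply hmin _ h
        rw [pv_singleton_prefix, List.head?_drop]
        have := List.findIdx_getElem (w := hfl) (p := (· == a)) (xs := cs)
        simp at this
        simp [List.getElem?_eq_getElem hfl, this]
      · exact h
      · exfalso
        have := List.not_of_lt_findIdx (xs := cs) (p := (· == a)) h
        rw [List.getElem?_eq_getElem hnlen] at hget
        simp_all
    simp only [if_pos hm, heq, hn]
    omega
  · have hni : ¬ [a] <:+: cs := fun h => hm (h.sublist.mem (by simp))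
    have h1 := PySem.Chars.neg_one_le_find (s := cs) (sub := [a])
    have h2 : ¬ PySem.Chars.find cs [a] ≠ -1 :=
      fun hne => hni ((PySem.Chars.find_ne_neg_one_iff cs [a]).mp hne)
    simp only [ne_eq, not_not] at h2
    simp [if_neg hm, h2]

theorem pv_take_pvT (l : List Char) (h : ')' ∉ l) : l.take (pvT l) = l := by
  have : pvT l = l.length := by
    apply List.findIdx_eq_length.mpr
    intro x hx
    simp only [beq_eq_false_iff_ne, ne_eq]
    exact fun hxe => h (hxe ▸ hx)
  simp [this]

-- ===== VERDICT (by name: the statement is the Claim_ definition above) =====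
theorem Listas_Bipartes_spec : Claim_equal_Listas_Bipartes := by
  intro cadena _
  unfold Spec_Listas_Bipartes Listas_Bipartes Listas_Bipartes_alt
  set cs := cadena.toList with hcs
  simp only [pvLoopA1_spec, List.nil_append]
  by_cases hm : ')' ∈ cs
  · have hfind : PySem.Chars.find cs [')'] = ((pvT cs : Nat) : Int) := by
      rw [pv_find_singleton, if_pos hm]; rfl
    have hne : ((pvT cs : Nat) : Int) ≠ -1 := by omega
    simp only [hfind, if_pos hm, if_neg hne]
    have hslice1 : PySem.List.slice cs none (some ((pvT cs : Nat) : Int)) = cs.take (pvT cs) := by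
      rw [PySem.List.slice_to]
      · simp
      · omega
    have hslice2 : PySem.List.slice cs (some (((pvT cs : Nat) : Int) + 1)) none
        = cs.drop (pvT cs + 1) := by
      have hc : ((pvT cs : Nat) : Int) + 1 = ((pvT cs + 1 : Nat) : Int) := by push_cast; ring
      rw [hc, PySem.List.slice_from]
      · simp
      · omega
    simp only [hslice1, hslice2]
    rw [pvLoopA2_spec]
    simp only [Nat.zero_add, List.nil_append]
    set r := List.drop (pvT cs + 1) cs with hr
    by_cases hm2 : ')' ∈ r
    · have hf2 : PySem.Chars.find r [')'] = ((pvT r : Nat) : Int) := by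
        rw [pv_find_singleton, if_pos hm2]; rfl
      have hne2 : ((pvT r : Nat) : Int) ≠ -1 := by omega
      simp only [hf2, if_neg hne2]
      rw [PySem.List.slice_to]
      · simp
      · omega
    · have hf2 : PySem.Chars.find r [')'] = -1 := by
        rw [pv_find_singleton, if_neg hm2]
      simp [hf2, pv_take_pvT r hm2]
  · have hfind : PySem.Chars.find cs [')'] = -1 := by
      rw [pv_find_singleton, if_neg hm]
    have hf0 : PySem.Chars.find ([] : List Char) [')'] = -1 := by
      rw [pv_find_singleton]; simp
    simp only [hfind]
    rw [pv_take_pvT cs hm]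
    simp [hm, List.drop_length, pvLoopA2, hf0, pvKeep]
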